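-- pv_equiv track=rewrite | github.com/VNCERT-CC/KMACTF-2022 | ctf-deploy/prog/chall02/sol.py | lines2matrix
-- ===== SOURCE A (Python) =====
-- def lines2matrix(lines):
--   lines = lines.strip('\n').split('\n')
--   y = 0
--   h = len(lines)
--   matrix = [None] * h
--   for line in lines:
--     x = 0
--     d = len(line)
--     matrix[y] = [None] * d
--     can_be_none = True
--     for c in line:
--       if c == ' ' and can_be_none:
--         c = None
--       else:
--         can_be_none = False
--       matrix[y][x] = c
--       x +=1
--
--     can_be_none = True
--     i = d
--     for c in line[::-1]:
--       if c == ' ' and can_be_none: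
--         i-=1
--         matrix[y][i] = None
--       else:
--         break
--
--     y += 1
--   return matrix
-- ===== SOURCE B (Python) =====
-- def lines2matrix(lines):
--     out = []
--     for line in lines.strip('\n').split('\n'):
--         lo = len(line) - len(line.lstrip(' '))
--         hi = len(line.rstrip(' '))
--         out.append([None if i < lo or i >= hi else c for i, c in enumerate(line)])
--     return out
-- ===== Notes on version B (the rewrite author's own statement) =====
-- stated objective: simpler
-- what changed: Replaces A's two mutating passes per row (a forward flag-carrying loop nulling leading spaces, then a reverse loop overwriting trailing spaces with break) by computing the blank boundaries lo/hi once with lstrip/rstrip and building each row in a single comprehension by index.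
import Mathlib
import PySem

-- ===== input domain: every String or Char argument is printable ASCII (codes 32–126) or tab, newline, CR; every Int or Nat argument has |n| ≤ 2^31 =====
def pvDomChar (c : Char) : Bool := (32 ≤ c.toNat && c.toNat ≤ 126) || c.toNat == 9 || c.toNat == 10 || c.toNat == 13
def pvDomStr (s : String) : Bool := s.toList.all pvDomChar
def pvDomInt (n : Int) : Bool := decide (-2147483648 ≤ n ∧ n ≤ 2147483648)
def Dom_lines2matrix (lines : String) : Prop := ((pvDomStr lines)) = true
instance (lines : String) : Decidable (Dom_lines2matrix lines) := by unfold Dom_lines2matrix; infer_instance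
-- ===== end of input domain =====

-- B computes each row's blank boundaries with lstrip/rstrip and fills the row in one
-- indexed pass, instead of A's forward flag loop plus reverse mutating loop (simpler).

-- ===== PORT A =====
-- forward loop: leading spaces (while can_be_none) become None, other chars are kept
def pvRowFwdA : List Char → Bool → List (Option String)
  | [], _ => []
  | c :: rest, cb =>
      if c = ' ' ∧ cb then none :: pvRowFwdA rest cb
      else some (String.ofList [c]) :: pvRowFwdA rest false

-- reverse loop over line[::-1]: while spaces, decrement i and set matrix[y][i] = None; else break
def pvBackA : List Char → Nat → List (Option String) → List (Option String)
  | [], _, m => m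
  | c :: rest, i, m => if c = ' ' then pvBackA rest (i - 1) (m.set (i - 1) none) else m

def lines2matrix (lines : String) : List (List (Option String)) :=
  let ls := (PySem.Str.split? (PySem.Str.stripChars lines "\n") "\n").getD []
  ls.map (fun line =>
    let cs := line.toList
    pvBackA cs.reverse cs.length (pvRowFwdA cs true))

-- ===== PORT B =====
-- lo = len(line) - len(line.lstrip(' ')); hi = len(line.rstrip(' ')); hand ports of the
-- space-only lstrip/rstrip as dropWhile on the char list (exact: only ' ' is stripped)
def pvRowB (cs : List Char) : List (Option String) :=
  let lo : Int := cs.length - (cs.dropWhile (· = ' ')).length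
  let hi : Int := (cs.reverse.dropWhile (· = ' ')).length
  (PySem.List.enumerate cs 0).map (fun p =>
    if p.1 < lo ∨ p.1 ≥ hi then none else some (String.ofList [p.2]))

def lines2matrix_alt (lines : String) : List (List (Option String)) :=
  ((PySem.Str.split? (PySem.Str.stripChars lines "\n") "\n").getD []).map
    (fun line => pvRowB line.toList)

-- ===== PRECONDITION & SPEC =====
def Spec_lines2matrix (lines : String) (out : List (List (Option String))) : Prop := out = lines2matrix_alt lines
instance (lines : String) (out : List (List (Option String))) : Decidable (Spec_lines2matrix lines out) := by unfold Spec_lines2matrix; infer_instance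

-- ===== CLAIM (what is proved, stated in full; the proofs are below) =====
def Claim_equal_lines2matrix : Prop := ∀ (lines : String), Dom_lines2matrix lines → Spec_lines2matrix lines (lines2matrix lines)

-- ===== LEMMAS AND PROOFS =====

theorem pvRowFwdA_false (cs : List Char) :
    pvRowFwdA cs false = cs.map (fun c => some (String.ofList [c])) := by
  induction cs with
  | nil => rfl
  | cons c rest ih => simp [pvRowFwdA, ih]

theorem pvRowFwdA_true (cs : List Char) :
    pvRowFwdA cs true =
      List.replicate (cs.length - (cs.dropWhile (· = ' ')).length) (none : Option String) ++
        (cs.dropWhile (· = ' ')).map (fun c => some (String.ofList [c])) := by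
  induction cs with
  | nil => rfl
  | cons c rest ih =>
    by_cases hc : c = ' '
    · have hle := List.length_dropWhile_le (p := fun x => decide (x = ' ')) rest
      have h1 : rest.length + 1 - (List.dropWhile (fun x => decide (x = ' ')) rest).length
           = (rest.length - (List.dropWhile (fun x => decide (x = ' ')) rest).length) + 1 := by
        omega
      simp [pvRowFwdA, hc, List.dropWhile, ih, h1, List.replicate_succ]
    · simp [pvRowFwdA, hc, List.dropWhile, pvRowFwdA_false]

theorem pvBackA_eq (rs : List Char) (n : Nat) (m : List (Option String))
    (h1 : n ≤ m.length) (h2 : rs.length ≤ n) :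
    pvBackA rs n m =
      m.take (n - (rs.takeWhile (· = ' ')).length) ++
        List.replicate (rs.takeWhile (· = ' ')).length (none : Option String) ++
        m.drop n := by
  induction rs generalizing n m with
  | nil => simp [pvBackA]
  | cons c rest ih =>
    by_cases hc : c = ' '
    · have hn : 1 ≤ n := by simp at h2; omega
      have hlen : rest.length ≤ n - 1 := by simp at h2; omega
      have hm : n - 1 ≤ (m.set (n - 1) none).length := by simp; omega
      have hset : (m.set (n - 1) none).length = m.length := by simp
      rw [pvBackA, if_pos hc, ih (n - 1) _ hm hlen]
      have ht : (rest.takeWhile (· = ' ')).length ≤ rest.length := (List.takeWhile_prefix _).length_le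
      have htk : (m.set (n - 1) none).take (n - 1 - (rest.takeWhile (· = ' ')).length)
               = m.take (n - 1 - (rest.takeWhile (· = ' ')).length) := by
        rw [List.take_set]
        exact List.set_eq_of_length_le (by simp only [List.length_take]; omega)
      have hdr : (m.set (n - 1) none).drop (n - 1) = none :: m.drop n := by
        rw [List.drop_set]
        have hb : n - 1 < m.length := by omega
        have hn1 : n - 1 + 1 = n := by omega
        have hd : m.drop (n - 1) = m[n-1]'hb :: m.drop n := by
          rw [List.drop_eq_getElem_cons hb, hn1]
        rw [hd]
        simp
      simp only [List.takeWhile, hc, decide_true]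
      rw [htk, hdr]
      have harith : n - 1 - (rest.takeWhile (· = ' ')).length
                  = n - ((rest.takeWhile (· = ' ')).length + 1) := by omega
      rw [harith]
      simp [List.replicate_succ']
    · rw [pvBackA, if_neg hc]
      simp [List.takeWhile, hc]

theorem pvRow_eq (cs : List Char) :
    pvBackA cs.reverse cs.length (pvRowFwdA cs true) = pvRowB cs := by
  have hdw : (List.dropWhile (fun x => decide (x = ' ')) cs).length ≤ cs.length :=
    List.length_dropWhile_le _ cs
  have htw : (List.takeWhile (fun x => decide (x = ' ')) cs).length
           = cs.length - (List.dropWhile (fun x => decide (x = ' ')) cs).length := by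
    have h := congrArg List.length (List.takeWhile_append_dropWhile (p := fun x => decide (x = ' ')) (l := cs))
    rw [List.length_append] at h
    omega
  have hrt : (List.takeWhile (fun x => decide (x = ' ')) cs.reverse).length
           + (List.dropWhile (fun x => decide (x = ' ')) cs.reverse).length = cs.length := by
    have h := congrArg List.length (List.takeWhile_append_dropWhile (p := fun x => decide (x = ' ')) (l := cs.reverse))
    rw [List.length_append, List.length_reverse] at h
    omega
  have hflen : (pvRowFwdA cs true).length = cs.length := by
    rw [pvRowFwdA_true]; simp; omega
  rw [pvBackA_eq _ _ _ (by omega) (by simp)]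
  rw [List.drop_eq_nil_of_le (by omega), List.append_nil]
  apply List.ext_getElem
  · simp [pvRowB, PySem.List.length_enumerate, hflen]
    omega
  · intro i h1 h2
    have hin : i < cs.length := by
      simpa [pvRowB, PySem.List.length_enumerate] using h2
    -- right-hand side: one indexed pass
    have hR : (pvRowB cs)[i]'h2
        = if (i : Int) < (cs.length : Int) - ((List.dropWhile (fun x => decide (x = ' ')) cs).length : Int)
             ∨ (i : Int) ≥ ((List.dropWhile (fun x => decide (x = ' ')) cs.reverse).length : Int)
          then none else some (String.ofList [cs[i]'hin]) := by
      simp [pvRowB, PySem.List.getElem_enumerate]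
    rw [hR]
    by_cases hhi : i < cs.length - (List.takeWhile (fun x => decide (x = ' ')) cs.reverse).length
    · -- inside the take-part: the forward row's entry
      rw [List.getElem_append_left (by simp [hflen]; omega)]
      rw [List.getElem_take]
      have hF : (pvRowFwdA cs true)[i]'(by omega)
          = if i < cs.length - (List.dropWhile (fun x => decide (x = ' ')) cs).length
            then none else some (String.ofList [cs[i]'hin]) := by
        by_cases hlo : i < cs.length - (List.dropWhile (fun x => decide (x = ' ')) cs).length
        · simp only [pvRowFwdA_true]
          rw [List.getElem_append_left (by simp; omega)]
          simp [hlo]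
        · simp only [pvRowFwdA_true]
          rw [List.getElem_append_right (by simp; omega)]
          simp only [List.getElem_map, if_neg hlo]
          congr 2
          have : cs[i]'hin
              = (List.takeWhile (fun x => decide (x = ' ')) cs ++ List.dropWhile (fun x => decide (x = ' ')) cs)[i]'(by
                  rw [List.takeWhile_append_dropWhile]; exact hin) := by
            congr 1
            exact (List.takeWhile_append_dropWhile).symm
          rw [this, List.getElem_append_right (by rw [htw]; omega)]
          congr 1
          simp [htw]
      rw [hF]
      split_ifs with hA hB hB
      · rfl
      · exfalso; apply hB; left; omega
      · exfalso
        rcases hB with hB | hB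
        · apply hA; omega
        · omega
      · rfl
    · -- inside the trailing replicate: None on both sides
      rw [List.getElem_append_right (by simp [hflen]; omega)]
      simp only [List.getElem_replicate]
      rw [if_pos]
      right
      omega

theorem lines2matrix_spec : Claim_equal_lines2matrix := by
  intro lines _
  unfold Spec_lines2matrix lines2matrix lines2matrix_alt
  exact List.map_congr_left (fun line _ => pvRow_eq line.toList)
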